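-- pv_equiv track=rewrite | github.com/ctc316/algorithm-python | Lintcode/Ladder_63_G1807/1580. Transition String.py | getTransforms
-- ===== SOURCE A (Python) =====
-- def getTransforms(string):
--     results = []
--     for src in [chr(97 + i) for i in range(26)]:
--         for tar in [chr(97 + i) for i in range(26)]:
--             if src == tar:
--                 continue
--
--             new_str = string.replace(src, tar)
--             if new_str != string:
--                 results.append(new_str)
--
--     return results
-- ===== SOURCE B (Python) =====
-- def getTransforms(string):
--     # stage 1: build an index of the letters that occur, each with the string
--     # pre-split on that letter (one split per source, reused for all 25 targets)
--     index = []
--     for i in range(26):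
--         c = chr(97 + i)
--         parts = string.split(c)
--         if len(parts) > 1:
--             index.append((c, parts))
--     # stage 2: generate every transform by joining the precomputed parts
--     results = []
--     for src, parts in index:
--         for j in range(26):
--             tar = chr(97 + j)
--             if tar != src:
--                 results.append(tar.join(parts))
--     return results
-- ===== Notes on version B (the rewrite author's own statement) =====
-- stated objective: alternative
-- what changed: B replaces A's 26x26 replace-and-compare scan with a two-stage split/join scheme: stage 1 splits the string once per letter and indexes only the letters whose split has more than one part; stage 2 emits each transform by joining those precomputed parts with the target letter, with no replace call and no changed-string test.
import Mathlib
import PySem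

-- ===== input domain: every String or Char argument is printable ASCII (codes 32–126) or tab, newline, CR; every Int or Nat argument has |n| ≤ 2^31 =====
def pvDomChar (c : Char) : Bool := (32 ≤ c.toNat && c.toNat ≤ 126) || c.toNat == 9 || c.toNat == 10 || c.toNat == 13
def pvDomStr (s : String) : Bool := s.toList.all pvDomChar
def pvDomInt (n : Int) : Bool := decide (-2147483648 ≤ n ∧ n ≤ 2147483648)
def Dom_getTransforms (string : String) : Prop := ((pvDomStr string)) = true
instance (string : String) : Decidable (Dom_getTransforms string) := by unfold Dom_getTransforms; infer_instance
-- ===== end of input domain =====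

-- B replaces A's 26x26 replace-and-test scan with a two-stage split/join scheme (one split
-- per letter, an index of occurring letters, then join with each target); objective:
-- alternative — identical output list and order.

-- ===== PORT A =====
-- [chr(97 + i) for i in range(26)]  (both Pythons build this alphabet via chr/range)
def pvAlphabet : List Char := (PySem.List.pyRange 0 26 1).map (fun i => Char.ofNat (97 + i).toNat)

def getTransforms (string : String) : List String :=
  pvAlphabet.foldl (fun results src =>
    pvAlphabet.foldl (fun results tar =>
      if src == tar then results
      else
        let new_str := PySem.Str.replace string (String.ofList [src]) (String.ofList [tar])
        if new_str ≠ string then results ++ [new_str] else results) results) []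

-- ===== PORT B =====
-- string.split(c) with the nonempty one-char separator c is exactly PySem.Chars.splitOn on
-- the code points (PySem.Str.split? returns some of this list for a nonempty separator).
def getTransforms_alt (string : String) : List String :=
  let index : List (Char × List String) :=
    pvAlphabet.foldl (fun idx c =>
      let parts := (PySem.Chars.splitOn string.toList [c]).map String.ofList
      if parts.length > 1 then idx ++ [(c, parts)] else idx) []
  index.foldl (fun results sp =>
    pvAlphabet.foldl (fun results tar =>
      if tar != sp.1 then results ++ [PySem.Str.join (String.ofList [tar]) sp.2]
      else results) results) []

-- ===== PRECONDITION & SPEC =====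
def Spec_getTransforms (string : String) (out : List String) : Prop := out = getTransforms_alt string
instance (string : String) (out : List String) : Decidable (Spec_getTransforms string out) := by unfold Spec_getTransforms; infer_instance

-- ===== CLAIM =====
def Claim_equal_getTransforms : Prop := ∀ (string : String), Dom_getTransforms string → Spec_getTransforms string (getTransforms string)

-- ===== LEMMAS AND PROOFS =====

-- reference splitter: pvSp a pre l = the parts of l split on a, pre being the part built so far
def pvSp (a : Char) : List Char → List Char → List (List Char)
  | pre, [] => [pre]
  | pre, c :: t => if c = a then pre :: pvSp a [] t else pvSp a (pre ++ [c]) t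

theorem pvSp_ne_nil (a : Char) (pre l : List Char) : pvSp a pre l ≠ [] := by
  induction l generalizing pre with
  | nil => simp [pvSp]
  | cons c t ih =>
    simp only [pvSp]
    split
    · simp
    · exact ih _

theorem pvSplitOnGo (a : Char) : ∀ (fuel : Nat) (l cur : List Char) (acc : List (List Char)),
    l.length < fuel →
    PySem.Chars.splitOn.go [a] fuel l cur acc = acc.reverse ++ pvSp a cur.reverse l := by
  intro fuel
  induction fuel with
  | zero => intro l cur acc h; omega
  | succ n ih =>
    intro l cur acc h
    cases l with
    | nil => simp [PySem.Chars.splitOn.go, pvSp]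
    | cons c t =>
      have ht : t.length < n := by simpa using h
      simp only [PySem.Chars.splitOn.go]
      by_cases hc : c = a
      · subst hc
        have hp : [c].isPrefixOf (c :: t) = true := by simp [List.isPrefixOf]
        rw [if_pos hp]
        simp only [List.length_cons, List.length_nil, List.drop_succ_cons, List.drop_zero]
        rw [ih t [] (cur.reverse :: acc) ht]
        simp [pvSp]
      · have hp : [a].isPrefixOf (c :: t) = false := by
          simp only [List.isPrefixOf, Bool.and_true, beq_eq_false_iff_ne, ne_eq]
          intro hh; exact hc hh.symm
        rw [if_neg (by simp [hp])]
        rw [ih t (c :: cur) acc ht]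
        simp [pvSp, hc]

theorem pvSplitOnEq (a : Char) (l : List Char) :
    PySem.Chars.splitOn l [a] = pvSp a [] l := by
  unfold PySem.Chars.splitOn
  have := pvSplitOnGo a (l.length + 1) l [] [] (by omega)
  simpa using this

theorem pvSpLen (a : Char) (pre l : List Char) :
    1 < (pvSp a pre l).length ↔ a ∈ l := by
  induction l generalizing pre with
  | nil => simp [pvSp]
  | cons c t ih =>
    simp only [pvSp, List.mem_cons]
    by_cases hc : c = a
    · rw [if_pos hc]
      have h1 : 1 ≤ (pvSp a [] t).length :=
        List.length_pos_iff.mpr (pvSp_ne_nil a [] t)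
      simp only [List.length_cons]
      constructor
      · intro _; exact Or.inl hc.symm
      · intro _; omega
    · rw [if_neg hc, ih]
      constructor
      · exact Or.inr
      · rintro (h | h)
        · exact absurd h.symm hc
        · exact h

theorem pvJoinSp (a b : Char) (pre l : List Char) :
    PySem.Chars.join [b] (pvSp a pre l) = pre ++ l.map (fun c => if c = a then b else c) := by
  induction l generalizing pre with
  | nil => simp [pvSp, PySem.Chars.join, List.intercalate]
  | cons c t ih =>
    simp only [pvSp]
    by_cases hc : c = a
    · rw [if_pos hc]
      have hne := pvSp_ne_nil a [] t
      obtain ⟨x, xs, hx⟩ := List.exists_cons_of_ne_nil hne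
      simp only [PySem.Chars.join, List.intercalate] at ih ⊢
      rw [hx]
      simp only [List.intersperse, List.flatten]
      have hih := ih ([] : List Char)
      rw [hx] at hih
      simp only [List.nil_append] at hih
      simp [hih, hc]
    · rw [if_neg hc, ih]
      simp [hc]

theorem pvFoldlAppendIte {α β : Type} (p : α → Prop) [DecidablePred p] (f : α → β)
    (l : List α) (acc : List β) :
    l.foldl (fun acc x => if p x then acc ++ [f x] else acc) acc
      = acc ++ (l.filter (fun x => decide (p x))).map f := by
  induction l generalizing acc with
  | nil => simp
  | cons x t ih =>
    simp only [List.foldl_cons, List.filter_cons]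
    by_cases hx : p x
    · simp [hx, ih]
    · simp [hx, ih]

theorem pvGoSingle (a b : Char) : ∀ (fuel : Nat) (l acc : List Char), l.length ≤ fuel →
    PySem.Chars.replace.go [a] [b] fuel l acc
      = acc.reverse ++ l.map (fun c => if c = a then b else c) := by
  intro fuel
  induction fuel with
  | zero =>
    intro l acc h
    have : l = [] := List.length_eq_zero_iff.mp (Nat.le_zero.mp h)
    subst this; simp [PySem.Chars.replace.go]
  | succ n ih =>
    intro l acc h
    cases l with
    | nil => simp [PySem.Chars.replace.go]
    | cons c t =>
      have ht : t.length ≤ n := by simpa using h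
      simp only [PySem.Chars.replace.go]
      by_cases hc : c = a
      · subst hc
        have hp : [c].isPrefixOf (c :: t) = true := by simp [List.isPrefixOf]
        rw [if_pos hp]
        simp only [List.length_cons, List.length_nil, List.drop_succ_cons, List.drop_zero,
          List.reverse_cons, List.reverse_nil, List.nil_append]
        rw [List.singleton_append, ih t (b :: acc) ht]
        simp
      · have hp : [a].isPrefixOf (c :: t) = false := by
          simp only [List.isPrefixOf, Bool.and_true, beq_eq_false_iff_ne, ne_eq]
          intro hh
          exact hc hh.symm
        rw [if_neg (by simp [hp])]
        rw [ih t (c :: acc) ht]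
        simp [hc]

theorem pvReplaceSingle (a b : Char) (l : List Char) :
    PySem.Chars.replace l [a] [b] = l.map (fun c => if c = a then b else c) := by
  rw [PySem.Chars.replace]
  simp only [List.isEmpty_cons]
  rw [pvGoSingle a b l.length l [] (le_refl _)]
  simp

theorem pvMapSubstEq (a b : Char) (hab : b ≠ a) (l : List Char) :
    l.map (fun c => if c = a then b else c) = l ↔ a ∉ l := by
  induction l with
  | nil => simp
  | cons c t ih =>
    simp only [List.map_cons, List.cons.injEq, List.mem_cons]
    constructor
    · rintro ⟨h1, h2⟩ hmem
      rcases hmem with rfl | hmem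
      · rw [if_pos rfl] at h1; exact hab h1
      · exact (ih.mp h2) hmem
    · intro h
      have h1 : ¬ (a = c) := fun hh => h (Or.inl hh)
      have h2 : a ∉ t := fun hh => h (Or.inr hh)
      refine ⟨?_, ih.mpr h2⟩
      rw [if_neg (fun hh => h1 hh.symm)]

theorem pvReplaceEqIff (s : String) (a b : Char) (hab : a ≠ b) :
    PySem.Str.replace s (String.ofList [a]) (String.ofList [b]) = s ↔ a ∉ s.toList := by
  constructor
  · intro h
    have := congrArg String.toList h
    rw [PySem.Str.toList_replace] at this
    simp only [String.toList_ofList] at this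
    rw [pvReplaceSingle] at this
    exact (pvMapSubstEq a b (fun hh => hab hh.symm) s.toList).mp this
  · intro h
    have hl : (PySem.Str.replace s (String.ofList [a]) (String.ofList [b])).toList = s.toList := by
      rw [PySem.Str.toList_replace]
      simp only [String.toList_ofList]
      rw [pvReplaceSingle]
      exact (pvMapSubstEq a b (fun hh => hab hh.symm) s.toList).mpr h
    exact String.toList_inj.mp hl

-- B's joined string equals A's replaced string (single-char src/tar)
theorem pvJoinEqReplace (s : String) (src tar : Char) :
    PySem.Str.join (String.ofList [tar]) ((PySem.Chars.splitOn s.toList [src]).map String.ofList)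
      = PySem.Str.replace s (String.ofList [src]) (String.ofList [tar]) := by
  apply String.toList_inj.mp
  rw [PySem.Str.toList_join, PySem.Str.toList_replace]
  simp only [String.toList_ofList, List.map_map]
  have hmap : (PySem.Chars.splitOn s.toList [src]).map (String.toList ∘ String.ofList)
      = PySem.Chars.splitOn s.toList [src] := by
    apply List.map_id''
    intro x; simp
  rw [hmap, pvSplitOnEq, pvJoinSp, pvReplaceSingle]
  simp

theorem pvFoldlConst {α β : Type} (f : β → α → β) (l : List α) (res : β)
    (h : ∀ r x, x ∈ l → f r x = r) : l.foldl f res = res := by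
  induction l generalizing res with
  | nil => rfl
  | cons x t ih =>
    simp only [List.foldl_cons]
    rw [h res x (by simp)]
    exact ih res (fun r y hy => h r y (by simp [hy]))

theorem pvFoldlCongr {α β : Type} (f g : β → α → β) (l : List α)
    (h : ∀ r x, x ∈ l → f r x = g r x) : ∀ res, l.foldl f res = l.foldl g res := by
  induction l with
  | nil => intro res; rfl
  | cons x t ih =>
    intro res
    simp only [List.foldl_cons]
    rw [h res x (by simp)]
    exact ih (fun r y hy => h r y (by simp [hy])) _


theorem pvFoldlIfFilter {α β : Type} (g : β → α → β) (p : α → Bool) (l : List α) (res : β) :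
    l.foldl (fun r x => if p x then g r x else r) res = (l.filter p).foldl g res := by
  induction l generalizing res with
  | nil => rfl
  | cons x t ih =>
    by_cases hx : p x = true
    · simp [List.foldl_cons, hx, ih]
    · simp only [List.foldl_cons, List.filter_cons, hx]
      simp only [Bool.false_eq_true, if_false]
      exact ih res

theorem pvPartsLen (s : String) (c : Char) :
    (1 < ((PySem.Chars.splitOn s.toList [c]).map String.ofList).length) ↔ c ∈ s.toList := by
  rw [List.length_map, pvSplitOnEq, pvSpLen]

-- A's inner loop, for a present src, equals B's inner loop on the indexed parts
theorem pvInnerEq (s : String) (src : Char) (res : List String) (h : src ∈ s.toList) :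
    pvAlphabet.foldl (fun results tar =>
      if src == tar then results
      else
        let new_str := PySem.Str.replace s (String.ofList [src]) (String.ofList [tar])
        if new_str ≠ s then results ++ [new_str] else results) res
    = pvAlphabet.foldl (fun results tar =>
        if tar != src then
          results ++ [PySem.Str.join (String.ofList [tar])
            ((PySem.Chars.splitOn s.toList [src]).map String.ofList)]
        else results) res := by
  apply pvFoldlCongr
  intro r tar _
  by_cases he : src = tar
  · simp [he]
  · have hne : PySem.Str.replace s (String.ofList [src]) (String.ofList [tar]) ≠ s := by
      intro hc
      exact absurd h ((pvReplaceEqIff s src tar he).mp hc)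
    have hts : ¬ tar = src := fun hh => he hh.symm
    simp [he, hts, hne, pvJoinEqReplace]

theorem pvInnerConst (s : String) (src : Char) (res : List String) (h : src ∉ s.toList) :
    pvAlphabet.foldl (fun results tar =>
      if src == tar then results
      else
        let new_str := PySem.Str.replace s (String.ofList [src]) (String.ofList [tar])
        if new_str ≠ s then results ++ [new_str] else results) res = res := by
  apply pvFoldlConst
  intro r tar _
  by_cases he : src = tar
  · simp [he]
  · have heq : PySem.Str.replace s (String.ofList [src]) (String.ofList [tar]) = s :=
      (pvReplaceEqIff s src tar he).mpr h
    simp [he, heq]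

-- ===== VERDICT =====
theorem getTransforms_spec : Claim_equal_getTransforms := by
  intro s _
  unfold Spec_getTransforms getTransforms getTransforms_alt
  simp only [gt_iff_lt]
  -- stage 1 of B: the index is the filtered-and-mapped alphabet
  rw [pvFoldlAppendIte
    (fun c => 1 < ((PySem.Chars.splitOn s.toList [c]).map String.ofList).length)
    (fun c => (c, (PySem.Chars.splitOn s.toList [c]).map String.ofList)) pvAlphabet []]
  simp only [List.nil_append, List.foldl_map]
  rw [show (fun c => decide (1 < ((PySem.Chars.splitOn s.toList [c]).map String.ofList).length))
      = (fun c => decide (c ∈ s.toList)) by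
    funext c; rw [decide_eq_decide]; exact pvPartsLen s c]
  rw [← pvFoldlIfFilter
    (fun (results : List String) (src : Char) =>
      pvAlphabet.foldl (fun results tar =>
        if tar != src then
          results ++ [PySem.Str.join (String.ofList [tar])
            ((PySem.Chars.splitOn s.toList [src]).map String.ofList)]
        else results) results)
    (fun c => decide (c ∈ s.toList)) pvAlphabet []]
  refine pvFoldlCongr _ _ _ ?_ []
  intro res src _
  by_cases h : src ∈ s.toList
  · rw [pvInnerEq s src res h]
    simp [h]
  · rw [pvInnerConst s src res h]
    simp [h]
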